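-- pv_equiv track=rewrite | github.com/mtooks/poker_llm_area | players/gto_player.py | _flush_info
-- ===== SOURCE A (Python) =====
-- from collections import Counter
-- from typing import Any, Dict, List, Optional, Sequence, Tuple
--
-- def _flush_info(cards: List[Tuple[int, str]]) -> Tuple[Optional[str], List[int]]:
--     suits = [s for _, s in cards]
--     suit_counts = Counter(suits)
--     for suit, count in suit_counts.items():
--         if count >= 5:
--             suited_values = [v for v, s in cards if s == suit]
--             return suit, suited_values
--     return None, []
-- ===== SOURCE B (Python) =====
-- from collections import defaultdict
-- from typing import List, Optional, Tuple
--
-- def _flush_info(cards: List[Tuple[int, str]]) -> Tuple[Optional[str], List[int]]: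
--     groups = defaultdict(list)
--     for v, s in cards:
--         groups[s].append(v)
--     for suit, vals in groups.items():
--         if len(vals) >= 5:
--             return suit, vals
--     return None, []
-- ===== Notes on version B (the rewrite author's own statement) =====
-- stated objective: idiomatic
-- what changed: B groups values by suit in one pass with a defaultdict(list), so the second scan of cards that A performs after counting is eliminated.
import Mathlib
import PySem

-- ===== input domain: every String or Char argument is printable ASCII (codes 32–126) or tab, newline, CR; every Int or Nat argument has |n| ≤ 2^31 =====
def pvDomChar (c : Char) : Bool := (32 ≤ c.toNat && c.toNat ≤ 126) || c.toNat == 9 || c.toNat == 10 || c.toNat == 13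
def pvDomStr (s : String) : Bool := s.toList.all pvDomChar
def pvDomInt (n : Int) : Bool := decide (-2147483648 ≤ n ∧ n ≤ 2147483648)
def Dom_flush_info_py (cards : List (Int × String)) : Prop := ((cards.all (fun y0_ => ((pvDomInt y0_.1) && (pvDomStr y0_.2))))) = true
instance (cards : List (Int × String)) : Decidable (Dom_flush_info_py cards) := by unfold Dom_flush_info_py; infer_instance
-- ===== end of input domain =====

-- B groups values by suit in one pass (defaultdict(list)) instead of counting then rescanning; idiomatic, same cost.


-- ===== PORT A =====
-- the for-loop over suit_counts.items(): first suit with count >= 5, rescanning cards for its values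
def flushLoopA (cards : List (Int × String)) : List (String × Int) → Option String × List Int
  | [] => (none, [])
  | (suit, count) :: rest =>
      if 5 ≤ count then (some suit, (cards.filter (fun p => p.2 == suit)).map (·.1))
      else flushLoopA cards rest

def flush_info_py (cards : List (Int × String)) : Option String × List Int :=
  let suits := cards.map (·.2)
  let suit_counts := PySem.Dict.counter suits
  flushLoopA cards suit_counts.items

-- ===== PORT B =====
-- the for-loop over groups.items(): first suit whose value-list has length >= 5
def flushLoopB : List (String × List Int) → Option String × List Int
  | [] => (none, [])
  | (suit, vals) :: rest =>
      if 5 ≤ vals.length then (some suit, vals) else flushLoopB rest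

def flush_info_py_alt (cards : List (Int × String)) : Option String × List Int :=
  let groups := cards.foldl (fun d p => d.modify p.2 [] (· ++ [p.1])) PySem.Dict.empty
  flushLoopB groups.items

-- ===== PRECONDITION & SPEC =====
def Spec_flush_info_py (cards : List (Int × String)) (out : Option String × List Int) : Prop := out = flush_info_py_alt cards
instance (cards : List (Int × String)) (out : Option String × List Int) : Decidable (Spec_flush_info_py cards out) := by unfold Spec_flush_info_py; infer_instance

-- ===== CLAIM (what is proved, stated in full; the proofs are below) =====
def Claim_equal_flush_info_py : Prop := ∀ (cards : List (Int × String)), Dom_flush_info_py cards → Spec_flush_info_py cards (flush_info_py cards)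

-- ===== LEMMAS AND PROOFS =====

-- group dict's items: same keys as the Counter, paired with the suited values in card order
lemma groups_items (cards : List (Int × String)) :
    (cards.foldl (fun d p => d.modify p.2 [] (· ++ [p.1])) PySem.Dict.empty).items
      = (PySem.Set.ofList (cards.map (·.2))).map
          (fun k => (k, (cards.filter (fun p => p.2 == k)).map (·.1))) := by
  set d := cards.foldl (fun d p => d.modify p.2 [] (· ++ [p.1])) PySem.Dict.empty with hd
  have hkeys : d.keys = PySem.Set.ofList (cards.map (·.2)) := by
    rw [hd, PySem.Dict.keys_foldl_modify_key cards (·.2)]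
    simp [PySem.Set.update_nil_left]
  have hnd : d.keys.Nodup := by
    rw [hkeys]; exact PySem.Set.nodup_ofList _
  have hitems := PySem.Dict.items_eq_map_keys d hnd []
  rw [hitems, hkeys]
  refine List.map_congr_left (fun k hk => ?_)
  have hg : d.getD k [] = (cards.filter (fun p => p.2 == k)).map (·.1) := by
    have hswap : d = (cards.map (fun p => (p.2, p.1))).foldl
        (fun d q => d.modify q.1 [] (· ++ [q.2])) PySem.Dict.empty := by
      rw [hd, List.foldl_map]
    rw [hswap, PySem.Dict.getD_foldl_modify_append]
    simp [List.filter_map, Function.comp_def, List.map_map]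
  rw [hg]

-- the two loops agree over the shared key list
lemma loops_agree (cards : List (Int × String)) (ks : List String) :
    flushLoopA cards (ks.map (fun k => (k, ((cards.map (·.2)).count k : Int))))
      = flushLoopB (ks.map (fun k => (k, (cards.filter (fun p => p.2 == k)).map (·.1)))) := by
  induction ks with
  | nil => rfl
  | cons k ks ih =>
      simp only [List.map_cons, flushLoopA, flushLoopB, List.length_map]
      have hc : (cards.map (·.2)).count k = (cards.filter (fun p => p.2 == k)).length := by
        rw [List.count_eq_countP, List.countP_map, List.countP_eq_length_filter]; rfl
      by_cases h5 : 5 ≤ (cards.filter (fun p => p.2 == k)).length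
      · have hi : (5 : Int) ≤ ((cards.map (·.2)).count k : Int) := by
          rw [hc]; exact_mod_cast h5
        simp [hi, h5]
      · have hi : ¬ (5 : Int) ≤ ((cards.map (·.2)).count k : Int) := by
          rw [hc]; exact_mod_cast h5
        simp [hi, h5, ih]

-- ===== VERDICT (by name: the statement is the Claim_ definition above) =====
theorem flush_info_py_spec : Claim_equal_flush_info_py := by
  intro cards _
  show flush_info_py cards = flush_info_py_alt cards
  have hA : flush_info_py cards
      = flushLoopA cards (PySem.Dict.counter (cards.map (·.2))).items := rfl
  have hB : flush_info_py_alt cards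
      = flushLoopB (cards.foldl (fun d p => d.modify p.2 [] (· ++ [p.1])) PySem.Dict.empty).items := rfl
  rw [hA, hB, PySem.Dict.items_counter, groups_items, loops_agree]
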